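-- pv_equiv track=rewrite | github.com/jeremypmobley/nonsense | euchre/utils.py | get_lowest_nontrump_card_in_suit
-- ===== SOURCE A (Python) =====
-- def get_lowest_nontrump_card_in_suit(hand: list,
--                                      suit: str):
--     """
--     Function to return lowest non-trump card in suit from given hand
--     Returns None if no cards found in suit
--     """
--     card_values = {
--         'A': 6,
--         'K': 5,
--         'Q': 4,
--         'J': 3,
--         'T': 2,
--         '9': 1,
--     }
--     card_to_play_points = 9
--     idx_to_return = None
--     for idx, card in enumerate(hand):
--         if card[-1] == suit:  # if card is in given suit
--             card_points = card_values[card[0]]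
--             if card_points < card_to_play_points:
--                 card_to_play_points = card_points
--                 idx_to_return = idx
--     if idx_to_return is not None:
--         return hand[idx_to_return]
-- ===== SOURCE B (Python) =====
-- def get_lowest_nontrump_card_in_suit(hand: list,
--                                      suit: str):
--     """
--     Function to return lowest non-trump card in suit from given hand
--     Returns None if no cards found in suit
--     """
--     card_values = {
--         'A': 6,
--         'K': 5,
--         'Q': 4,
--         'J': 3,
--         'T': 2,
--         '9': 1,
--     }
--     cards_in_suit = [card for card in hand if card[-1] == suit]
--     if not cards_in_suit:
--         return None
--     return sorted(cards_in_suit, key=lambda card: card_values[card[0]])[0]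
-- ===== Notes on version B (the rewrite author's own statement) =====
-- stated objective: alternative
-- what changed: B filters the hand to the in-suit cards and takes the head of a stable sort by card value, instead of A's single-pass scan that tracks a running minimum and its index and re-indexes the hand at the end.
import Mathlib
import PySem

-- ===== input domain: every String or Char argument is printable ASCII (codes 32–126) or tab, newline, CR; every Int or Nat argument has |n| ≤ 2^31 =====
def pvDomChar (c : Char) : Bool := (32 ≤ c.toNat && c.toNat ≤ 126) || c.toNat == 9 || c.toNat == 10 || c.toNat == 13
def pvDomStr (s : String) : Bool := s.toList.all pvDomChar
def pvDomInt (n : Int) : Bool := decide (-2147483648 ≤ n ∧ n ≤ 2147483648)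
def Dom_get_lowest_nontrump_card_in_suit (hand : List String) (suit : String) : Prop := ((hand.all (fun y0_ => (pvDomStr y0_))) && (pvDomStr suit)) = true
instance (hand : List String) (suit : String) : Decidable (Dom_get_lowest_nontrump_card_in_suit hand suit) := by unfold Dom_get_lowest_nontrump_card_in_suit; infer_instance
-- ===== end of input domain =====

-- B filters the hand to the in-suit cards and returns the head of a stable sort by card value,
-- instead of A's single-pass running-minimum/index scan; alternative decomposition, not faster.


-- ===== PORT A =====
-- the card_values dict of both Python versions ('A' … '9' are 1-char strings, ported as Char)
def pvCardValues : PySem.Dict Char Int :=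
  PySem.Dict.ofList [('A', 6), ('K', 5), ('Q', 4), ('J', 3), ('T', 2), ('9', 1)]

-- the body of A's for-loop: state = (card_to_play_points, idx_to_return), item = (idx, card)
def pvStepA (suit : String) (s : Int × Option Int) (p : Int × String) : Int × Option Int :=
  match PySem.Str.pyGet? p.2 (-1), PySem.Str.pyGet? p.2 0 with
  | some chL, some ch0 =>
    if suit.toList == [chL] then          -- card[-1] == suit
      match pvCardValues.get? ch0 with    -- card_values[card[0]]
      | some v => if v < s.1 then (v, some p.1) else s
      | none => s                         -- Python raises KeyError here; excluded by Pre_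
    else s
  | _, _ => s                             -- card == "": Python raises IndexError; excluded by Pre_

def get_lowest_nontrump_card_in_suit (hand : List String) (suit : String) : Option String :=
  let st := (PySem.List.enumerate hand).foldl (pvStepA suit) (9, none)
  match st.2 with
  | some idx => PySem.List.pyGet? hand idx   -- return hand[idx_to_return]
  | none => none

-- ===== PORT B =====
def pvInSuit (card suit : String) : Bool :=     -- card[-1] == suit
  match PySem.Str.pyGet? card (-1) with
  | some ch => suit.toList == [ch]
  | none => false                               -- Python raises IndexError here; excluded by Pre_

def pvKeyB (card : String) : Int :=             -- sort key: card_values[card[0]]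
  match PySem.Str.pyGet? card 0 with
  | some ch => (pvCardValues.get? ch).getD 0    -- none = KeyError; excluded by Pre_
  | none => 0                                   -- IndexError; excluded by Pre_

def get_lowest_nontrump_card_in_suit_alt (hand : List String) (suit : String) : Option String :=
  let cards_in_suit := hand.filter (fun card => pvInSuit card suit)
  if cards_in_suit.isEmpty then none
  else (PySem.List.sorted cards_in_suit pvKeyB).head?

-- ===== PRECONDITION & SPEC =====
-- a card is fine unless it is empty (card[-1] → IndexError) or it lies in the given suit
-- with a rank outside A K Q J T 9 (card_values[card[0]] → KeyError)
def pvValidCard (card suit : String) : Bool :=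
  match card.toList.getLast?, card.toList.head? with
  | some chL, some ch0 => !(suit.toList == [chL]) || (['A', 'K', 'Q', 'J', 'T', '9'] : List Char).contains ch0
  | _, _ => false

-- Pre_ excludes exactly the inputs on which Python A raises: a hand containing the empty
-- string, or an in-suit card whose rank character is not one of A K Q J T 9.
def Pre_get_lowest_nontrump_card_in_suit (hand : List String) (suit : String) : Prop :=
  ∀ card ∈ hand, pvValidCard card suit = true

instance (hand : List String) (suit : String) : Decidable (Pre_get_lowest_nontrump_card_in_suit hand suit) := by
  unfold Pre_get_lowest_nontrump_card_in_suit; infer_instance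

def pvWitness_get_lowest_nontrump_card_in_suit : List String × String := (["Ah", "9h", "Ks"], "h")

def Spec_get_lowest_nontrump_card_in_suit (hand : List String) (suit : String) (out : Option String) : Prop := out = get_lowest_nontrump_card_in_suit_alt hand suit
instance (hand : List String) (suit : String) (out : Option String) : Decidable (Spec_get_lowest_nontrump_card_in_suit hand suit out) := by unfold Spec_get_lowest_nontrump_card_in_suit; infer_instance

-- ===== CLAIM (what is proved, stated in full; the proofs are below) =====
def Claim_equal_get_lowest_nontrump_card_in_suit : Prop := ∀ (hand : List String) (suit : String), Dom_get_lowest_nontrump_card_in_suit hand suit → Pre_get_lowest_nontrump_card_in_suit hand suit → Spec_get_lowest_nontrump_card_in_suit hand suit (get_lowest_nontrump_card_in_suit hand suit)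

-- ===== LEMMAS AND PROOFS =====

-- invariant tying A's loop state after scanning xs to B's sorted view of xs
def pvInv (suit : String) (xs : List String) (st : Int × Option Int) : Prop :=
  match st.2 with
  | none => st.1 = 9 ∧ xs.filter (fun c => pvInSuit c suit) = []
  | some i => ∃ m t, PySem.List.sorted (xs.filter (fun c => pvInSuit c suit)) pvKeyB = m :: t ∧
      st.1 = pvKeyB m ∧ pvKeyB m < 9 ∧ 0 ≤ i ∧ PySem.List.pyGet? xs i = some m

lemma pvRankFacts (ch : Char) (h : ch ∈ (['A', 'K', 'Q', 'J', 'T', '9'] : List Char)) :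
    ∃ v, pvCardValues.get? ch = some v ∧ 0 < v ∧ v < 9 := by
  fin_cases h <;> exact ⟨_, rfl, by decide, by decide⟩

lemma pvGetAppend {α : Type} (xs : List α) (x m : α) (i : Int) (h0 : 0 ≤ i)
    (h : PySem.List.pyGet? xs i = some m) : PySem.List.pyGet? (xs ++ [x]) i = some m := by
  rw [PySem.List.pyGet?_of_nonneg xs h0] at h
  rw [PySem.List.pyGet?_of_nonneg (xs ++ [x]) h0]
  obtain ⟨hlt, -⟩ := List.getElem?_eq_some_iff.mp h
  rw [List.getElem?_append_left hlt]
  exact h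

lemma pvSortedAppend (ys : List String) (x : String) :
    PySem.List.sorted (ys ++ [x]) pvKeyB
      = PySem.List.insertBy (fun a b => decide (pvKeyB a < pvKeyB b)) x
          (PySem.List.sorted ys pvKeyB) := by
  rw [PySem.List.sorted_eq_foldl_insertBy, PySem.List.sorted_eq_foldl_insertBy, List.foldl_append]
  rfl

lemma pvMain (suit : String) (xs : List String)
    (h : ∀ c ∈ xs, pvValidCard c suit = true) :
    pvInv suit xs ((PySem.List.enumerate xs).foldl (pvStepA suit) (9, none)) := by
  induction xs using List.reverseRecOn with
  | nil => simp [pvInv, PySem.List.enumerate]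
  | append_singleton xs x ih =>
    have hx := h x (by simp)
    have hxs : ∀ c ∈ xs, pvValidCard c suit = true := fun c hc => h c (by simp [hc])
    have ihv := ih hxs
    -- peel one step off the fold
    have hfold : (PySem.List.enumerate (xs ++ [x])).foldl (pvStepA suit) (9, none)
        = pvStepA suit ((PySem.List.enumerate xs).foldl (pvStepA suit) (9, none))
            ((xs.length : Int), x) := by
      rw [show PySem.List.enumerate (xs ++ [x]) = PySem.List.enumerate xs ++ [((xs.length : Int), x)] by
        rw [PySem.List.enumerate_append]
        simp [PySem.List.enumerate_cons, PySem.List.enumerate_nil]]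
      rw [List.foldl_append]
      rfl
    rw [hfold]
    -- destructure the validity of x
    cases hL : x.toList.getLast? with
    | none => simp [pvValidCard, hL] at hx
    | some chL =>
    cases h0 : x.toList.head? with
    | none => simp [pvValidCard, hL, h0] at hx
    | some ch0 =>
    have hL' : PySem.List.pyGet? x.toList (-1) = some chL := by
      rw [PySem.List.pyGet?_neg_one, hL]
    have h0' : PySem.List.pyGet? x.toList 0 = some ch0 := by
      rw [PySem.List.pyGet?_zero, ← List.head?_eq_getElem?, h0]
    rcases hfs : (PySem.List.enumerate xs).foldl (pvStepA suit) (9, none) with ⟨p, o⟩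
    rw [hfs] at ihv
    cases hs : suit.toList == [chL] with
    | false =>
      -- x is not in the given suit: state and filter are unchanged
      have hs' : ¬ suit.toList = [chL] := by simpa using hs
      have hns : pvInSuit x suit = false := by simp [pvInSuit, hL', hs']
      have hstep : pvStepA suit (p, o) ((xs.length : Int), x) = (p, o) := by
        simp [pvStepA, hL', h0', hs']
      rw [hstep]
      have hfilt : (xs ++ [x]).filter (fun c => pvInSuit c suit)
          = xs.filter (fun c => pvInSuit c suit) := by
        simp [List.filter_append, hns]
      unfold pvInv at ihv ⊢
      cases o with
      | none => exact ⟨ihv.1, by rw [hfilt]; exact ihv.2⟩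
      | some i =>
        obtain ⟨m, t, hsort, hp, hm9, hi0, hget⟩ := ihv
        exact ⟨m, t, by rw [hfilt]; exact hsort, hp, hm9, hi0, pvGetAppend xs x m i hi0 hget⟩
    | true =>
      -- x is in the given suit, with a known rank
      have hseq : suit.toList = [chL] := by simpa using hs
      have hranks : ch0 ∈ (['A', 'K', 'Q', 'J', 'T', '9'] : List Char) := by
        simpa [pvValidCard, hL, h0, hs] using hx
      obtain ⟨v, hv, hvpos, hv9⟩ := pvRankFacts ch0 hranks
      have hkey : pvKeyB x = v := by simp [pvKeyB, h0', hv]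
      have hins : pvInSuit x suit = true := by simp [pvInSuit, hL', hseq]
      have hstep : pvStepA suit (p, o) ((xs.length : Int), x)
          = if v < p then (v, some (xs.length : Int)) else (p, o) := by
        simp [pvStepA, hL', h0', hseq, hv]
      rw [hstep]
      have hfilt : (xs ++ [x]).filter (fun c => pvInSuit c suit)
          = xs.filter (fun c => pvInSuit c suit) ++ [x] := by
        simp [List.filter_append, hins]
      unfold pvInv at ihv ⊢
      cases o with
      | none =>
        -- first in-suit card seen: it becomes both the running minimum and the sorted head
        obtain ⟨hp9, hfe⟩ := ihv
        have hp9' : p = 9 := hp9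
        rw [if_pos (by rw [hp9']; exact hv9)]
        refine ⟨x, [], ?_, hkey.symm, by rw [hkey]; exact hv9, Int.natCast_nonneg _, ?_⟩
        · rw [hfilt, hfe]
          rfl
        · exact PySem.List.pyGet?_append_length xs [] x
      | some i =>
        obtain ⟨m, t, hsort, hp, hm9, hi0, hget⟩ := ihv
        have hp' : p = pvKeyB m := hp
        rw [hfilt, pvSortedAppend, hsort]
        by_cases hlt : v < p
        · rw [if_pos hlt]
          rw [PySem.List.insertBy]
          rw [if_pos (by simp only [hkey, ← hp', decide_eq_true_eq]; exact hlt)]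
          exact ⟨x, m :: t, rfl, hkey.symm, by rw [hkey]; omega, Int.natCast_nonneg _,
            PySem.List.pyGet?_append_length xs [] x⟩
        · rw [if_neg hlt]
          rw [PySem.List.insertBy]
          rw [if_neg (by simp only [hkey, ← hp', decide_eq_true_eq]; exact hlt)]
          exact ⟨m, _, rfl, hp, hm9, hi0, pvGetAppend xs x m i hi0 hget⟩

-- ===== VERDICT (by name: the statement is the Claim_ definition above) =====
theorem get_lowest_nontrump_card_in_suit_spec : Claim_equal_get_lowest_nontrump_card_in_suit := by
  intro hand suit _ hpre
  unfold Spec_get_lowest_nontrump_card_in_suit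
  have hinv := pvMain suit hand hpre
  unfold get_lowest_nontrump_card_in_suit get_lowest_nontrump_card_in_suit_alt
  dsimp only [] at *
  unfold pvInv at hinv
  cases hst : ((PySem.List.enumerate hand).foldl (pvStepA suit) (9, none)).2 with
  | none =>
      rw [hst] at hinv
      simp [hinv.2]
  | some i =>
      rw [hst] at hinv
      obtain ⟨m, t, hsort, _, _, _, hget⟩ := hinv
      have hne : hand.filter (fun c => pvInSuit c suit) ≠ [] := by
        intro hnil
        have : PySem.List.sorted (hand.filter (fun c => pvInSuit c suit)) pvKeyB = [] :=
          (PySem.List.sorted_eq_nil_iff _ _ _).mpr hnil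
        rw [hsort] at this
        exact List.cons_ne_nil _ _ this
      simp [hget, List.isEmpty_iff, hne, hsort]
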